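-- pv_equiv track=rewrite | github.com/mike2ox/For_developer | ACM/Programmers/42585.py | solution
-- ===== SOURCE A (Python) =====
-- def solution(arrangement):
--     answer = 0
--     stack = []
--     arrangement = arrangement.replace("()", "X")
--
--     for pipe in arrangement:
--         if pipe == '(':
--             stack.append(pipe)
--             answer += 1
--         elif pipe == ')':
--             stack.pop()
--         else:
--             answer += len(stack)
--
--     return answer
-- ===== SOURCE B (Python) =====
-- def solution(arrangement):
--     answer = 0
--     stack = []
--     i = 0
--     n = len(arrangement)
--     while i < n:
--         c = arrangement[i]
--         if c == '(':
--             if i + 1 < n and arrangement[i + 1] == ')':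
--                 # laser: cut every pipe currently open
--                 answer += len(stack)
--                 i += 2
--             else:
--                 stack.append(c)
--                 answer += 1
--                 i += 1
--         elif c == ')':
--             stack.pop()
--             i += 1
--         else:
--             answer += len(stack)
--             i += 1
--     return answer
-- ===== Notes on version B (the rewrite author's own statement) =====
-- stated objective: alternative
-- what changed: A preprocesses with str.replace('()','X') and then scans the rewritten string with a three-way branch; B makes a single left-to-right scan of the original string with explicit index and one-character lookahead, classifying each '(' as laser or pipe on the spot, so no rewritten string is ever built.
import Mathlib
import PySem

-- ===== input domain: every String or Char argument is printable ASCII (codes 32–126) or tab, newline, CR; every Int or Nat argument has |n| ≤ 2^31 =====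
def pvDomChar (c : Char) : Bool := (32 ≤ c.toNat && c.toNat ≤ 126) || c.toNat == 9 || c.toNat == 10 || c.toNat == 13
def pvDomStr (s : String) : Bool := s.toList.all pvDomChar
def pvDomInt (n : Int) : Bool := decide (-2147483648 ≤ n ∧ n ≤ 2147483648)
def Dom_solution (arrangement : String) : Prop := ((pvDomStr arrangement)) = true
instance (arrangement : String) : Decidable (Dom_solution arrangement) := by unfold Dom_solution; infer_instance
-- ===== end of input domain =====

-- B fuses A's two passes (replace "()"→"X", then scan) into one lookahead scan: alternative decomposition, same cost.
-- On `)`-underflow both Pythons raise IndexError; those inputs are outside Pre_ (ports use a benign `.tail` there).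

-- ===== PORT A =====
-- one loop step of A: stack kept as a cons-front list (append = cons, pop = tail; only membership/length observable)
def solutionStep (st : Int × List Char) (pipe : Char) : Int × List Char :=
  if pipe = '(' then (st.1 + 1, '(' :: st.2)
  else if pipe = ')' then (st.1, st.2.tail)   -- stack.pop(); raises on empty stack, excluded by Pre_
  else (st.1 + st.2.length, st.2)

def solution (arrangement : String) : Int :=
  let arrangement' := PySem.Str.replace arrangement "()" "X"
  (arrangement'.toList.foldl solutionStep (0, [])).1

-- ===== PORT B =====
-- the while-loop of Source B with its one-character lookahead, as recursion over the remaining characters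
def solutionAltGo : List Char → List Char → Int → Int
  | [], _, answer => answer
  | c :: rest, stack, answer =>
    if c = '(' then
      if rest.head? = some ')' then
        solutionAltGo rest.tail stack (answer + stack.length)   -- laser: i += 2
      else solutionAltGo rest ('(' :: stack) (answer + 1)       -- pipe start
    else if c = ')' then solutionAltGo rest stack.tail answer   -- stack.pop()
    else solutionAltGo rest stack (answer + stack.length)
termination_by l _ _ => l.length
decreasing_by
  · cases rest <;> simp
  · simp
  · simp
  · simp

def solution_alt (arrangement : String) : Int :=
  solutionAltGo arrangement.toList [] 0

-- ===== PRECONDITION & SPEC =====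
-- Pre_ excludes exactly the strings on which A raises IndexError (stack.pop() on an empty stack):
-- some prefix contains more ')' than '('.  (B raises there too.)
def Pre_solution (arrangement : String) : Prop :=
  ∀ i < arrangement.toList.length + 1,
    (arrangement.toList.take i).count ')' ≤ (arrangement.toList.take i).count '('
instance (arrangement : String) : Decidable (Pre_solution arrangement) := by
  unfold Pre_solution; infer_instance

def pvWitness_solution : String := "(()(X)a)"

def Spec_solution (arrangement : String) (out : Int) : Prop := out = solution_alt arrangement
instance (arrangement : String) (out : Int) : Decidable (Spec_solution arrangement out) := by unfold Spec_solution; infer_instance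

-- ===== CLAIM (what is proved, stated in full; the proofs are below) =====
def Claim_equal_solution : Prop := ∀ (arrangement : String), Dom_solution arrangement → Pre_solution arrangement → Spec_solution arrangement (solution arrangement)

-- ===== LEMMAS AND PROOFS =====

-- the greedy one-pass "()"→"X" rewrite, as a plain recursion (proof-side reference form)
def pvRep : List Char → List Char
  | [] => []
  | [c] => [c]
  | c :: d :: t =>
    if c = '(' ∧ d = ')' then 'X' :: pvRep t else c :: pvRep (d :: t)
termination_by l => l.length

lemma pvRep_go (fuel : Nat) :
    ∀ (l acc : List Char), l.length ≤ fuel →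
      PySem.Chars.replace.go ['(', ')'] ['X'] fuel l acc = acc.reverse ++ pvRep l := by
  induction fuel with
  | zero =>
    intro l acc h
    have : l = [] := List.eq_nil_of_length_eq_zero (Nat.le_zero.mp h)
    subst this
    simp [PySem.Chars.replace.go, pvRep]
  | succ n ih =>
    intro l acc h
    match l with
    | [] => simp [PySem.Chars.replace.go, pvRep]
    | [c] =>
      rw [PySem.Chars.replace.go]
      have hpre : List.isPrefixOf ['(', ')'] [c] = false := by
        simp [List.isPrefixOf]
      simp only [hpre, Bool.false_eq_true, if_false]
      rw [ih [] (c :: acc) (by simp)]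
      simp [pvRep]
    | c :: d :: t =>
      rw [PySem.Chars.replace.go]
      by_cases hcd : c = '(' ∧ d = ')'
      · obtain ⟨hc, hd⟩ := hcd; subst hc; subst hd
        have hpre : List.isPrefixOf ['(', ')'] ('(' :: ')' :: t) = true := by
          simp [List.isPrefixOf]
        simp only [hpre, if_true]
        rw [show List.drop ['(', ')'].length ('(' :: ')' :: t) = t from rfl]
        rw [ih t (['X'].reverse ++ acc) (by simp at h ⊢; omega)]
        simp [pvRep]
      · have hpre : List.isPrefixOf ['(', ')'] (c :: d :: t) = false := by
          rcases (not_and_or.mp hcd) with hcne | hdne <;>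
            simp [List.isPrefixOf] <;> tauto
        simp only [hpre, Bool.false_eq_true, if_false]
        rw [ih (d :: t) (c :: acc) (by simp at h ⊢; omega)]
        rw [pvRep]
        simp [hcd]

lemma replace_eq_pvRep (l : List Char) :
    PySem.Chars.replace l ['(', ')'] ['X'] = pvRep l := by
  rw [PySem.Chars.replace]
  simp only [List.isEmpty_cons, Bool.false_eq_true, if_false]
  simpa using pvRep_go l.length l [] le_rfl

lemma go_nil (stack : List Char) (answer : Int) :
    solutionAltGo [] stack answer = answer := by
  simp [solutionAltGo]

lemma go_laser (t stack : List Char) (answer : Int) :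
    solutionAltGo ('(' :: ')' :: t) stack answer =
      solutionAltGo t stack (answer + stack.length) := by
  rw [solutionAltGo]; simp

lemma go_open (t stack : List Char) (answer : Int) (h : t.head? ≠ some ')') :
    solutionAltGo ('(' :: t) stack answer =
      solutionAltGo t ('(' :: stack) (answer + 1) := by
  rw [solutionAltGo]; simp [h]

lemma go_close (t stack : List Char) (answer : Int) :
    solutionAltGo (')' :: t) stack answer = solutionAltGo t stack.tail answer := by
  rw [solutionAltGo]; simp

lemma go_other (c : Char) (t stack : List Char) (answer : Int)
    (hc : c ≠ '(') (hc2 : c ≠ ')') :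
    solutionAltGo (c :: t) stack answer =
      solutionAltGo t stack (answer + stack.length) := by
  rw [solutionAltGo]; simp [hc, hc2]

lemma foldl_pvRep_eq_go :
    ∀ (l : List Char) (stack : List Char) (answer : Int),
      ((pvRep l).foldl solutionStep (answer, stack)).1 = solutionAltGo l stack answer := by
  intro l
  induction l using pvRep.induct with
  | case1 =>
    intro stack answer; simp [pvRep, go_nil]
  | case2 c =>
    intro stack answer
    rw [pvRep]
    by_cases hc : c = '('
    · subst hc
      rw [go_open [] stack answer (by simp)]
      simp [solutionStep, go_nil]
    · by_cases hc2 : c = ')'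
      · subst hc2
        rw [go_close]
        simp [solutionStep, go_nil]
      · rw [go_other c [] stack answer hc hc2]
        simp [solutionStep, hc, hc2, go_nil]
  | case3 c d t hcd ih =>
    intro stack answer
    obtain ⟨hc, hd⟩ := hcd; subst hc; subst hd
    rw [pvRep]
    rw [if_pos (⟨rfl, rfl⟩ : '(' = '(' ∧ ')' = ')'), List.foldl_cons, go_laser]
    rw [show solutionStep (answer, stack) 'X' = (answer + stack.length, stack) from by
      simp [solutionStep]]
    exact ih stack (answer + stack.length)
  | case4 c d t hcd ih =>
    intro stack answer
    rw [pvRep]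
    simp only [if_neg hcd, List.foldl_cons]
    by_cases hc : c = '('
    · subst hc
      have hd' : d ≠ ')' := fun h => hcd ⟨rfl, h⟩
      rw [go_open (d :: t) stack answer (by simp [hd'])]
      rw [show solutionStep (answer, stack) '(' = (answer + 1, '(' :: stack) from by
        simp [solutionStep]]
      exact ih ('(' :: stack) (answer + 1)
    · by_cases hc2 : c = ')'
      · subst hc2
        rw [go_close]
        rw [show solutionStep (answer, stack) ')' = (answer, stack.tail) from by
          simp [solutionStep]]
        exact ih stack.tail answer
      · rw [go_other c (d :: t) stack answer hc hc2]
        rw [show solutionStep (answer, stack) c = (answer + stack.length, stack) from by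
          simp [solutionStep, hc, hc2]]
        exact ih stack (answer + stack.length)

-- ===== VERDICT (by name: the statement is the Claim_ definition above) =====
theorem solution_spec : Claim_equal_solution := by
  intro arrangement _ _
  unfold Spec_solution solution solution_alt
  show ((PySem.Str.replace arrangement "()" "X").toList.foldl solutionStep (0, [])).1 =
    solutionAltGo arrangement.toList [] 0
  rw [PySem.Str.toList_replace,
    show ("()" : String).toList = ['(', ')'] from rfl,
    show ("X" : String).toList = ['X'] from rfl,
    replace_eq_pvRep, foldl_pvRep_eq_go]
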